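-- pv_equiv track=rewrite | github.com/GuilleIllana/Trabajo_IA | MS_eq_solver.py | new_possible_solution
-- ===== SOURCE A (Python) =====
-- def new_possible_solution(oa):
--     # a partir de un vector binario de 0/False (no mina) y 1/True (mina((False y True), donde este vector simboliza un
--     # posible modelo del mundo (model checking), se genera otro vector. Funciona básicamente como un sumador binario en
--     # cadena
--     if len(oa) > 1:
--         na, c = new_possible_solution(oa[:-1])
--     else:
--         c = True
--         na = []
--     if not c: # not carry out - not change
--         na.append(oa[-1])
--         return na, False
--     else: # change
--         na.append(not oa[-1])
--         return na, oa[-1] # carry out = 1 if oa[end] was 1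
-- ===== SOURCE B (Python) =====
-- def new_possible_solution(oa):
--     # Single-pass ripple-carry increment: flip leading True bits to False
--     # until the first False, which becomes True (carry absorbed); if every
--     # bit was True the carry propagates out.
--     na = list(oa)
--     for i in range(len(na)):
--         if na[i]:
--             na[i] = False
--         else:
--             na[i] = True
--             return na, False
--     return na, True
-- ===== Notes on version B (the rewrite author's own statement) =====
-- stated objective: faster
-- what changed: Replaces the recursive scheme that re-slices the prefix at every level (O(n^2) copying) with a single left-to-right pass that flips bits until the first False and stops.
import Mathlib
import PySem

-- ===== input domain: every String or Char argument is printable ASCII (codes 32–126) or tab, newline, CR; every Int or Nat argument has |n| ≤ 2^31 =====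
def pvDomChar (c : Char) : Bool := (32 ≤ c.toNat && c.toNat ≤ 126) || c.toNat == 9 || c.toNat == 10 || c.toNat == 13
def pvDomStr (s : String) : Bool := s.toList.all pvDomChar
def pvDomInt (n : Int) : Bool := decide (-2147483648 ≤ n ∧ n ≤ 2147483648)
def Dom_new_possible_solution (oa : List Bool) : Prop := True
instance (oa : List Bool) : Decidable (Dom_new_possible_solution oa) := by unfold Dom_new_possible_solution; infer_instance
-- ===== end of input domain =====

-- B replaces A's prefix-slicing recursion with a single left-to-right ripple-carry pass (O(n) vs O(n^2)).


-- ===== PORT A =====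
-- oa[:-1] = dropLast (exact); oa[-1] is exact on nonempty oa (Pre_ excludes [],
-- where the Python raises IndexError); getLastD false is the total stand-in.
def new_possible_solution (oa : List Bool) : List Bool × Bool :=
  let p := if h : oa.length > 1 then new_possible_solution oa.dropLast else ([], true)
  if p.2 = false then (p.1 ++ [oa.getLastD false], false)
  else (p.1 ++ [!oa.getLastD false], oa.getLastD false)
termination_by oa.length
decreasing_by simp [List.length_dropLast]; omega

-- ===== PORT B =====
-- Source B's single pass: a True bit flips to False and the loop continues;
-- the first False bit flips to True and the rest is returned unchanged.
def new_possible_solution_alt : List Bool → List Bool × Bool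
  | [] => ([], true)
  | false :: rest => (true :: rest, false)
  | true :: rest =>
      let p := new_possible_solution_alt rest
      (false :: p.1, p.2)

-- ===== PRECONDITION & SPEC =====
-- A raises IndexError on the empty list (oa[-1] on []); it is excluded.
def Pre_new_possible_solution (oa : List Bool) : Prop := oa ≠ []
instance (oa : List Bool) : Decidable (Pre_new_possible_solution oa) := by unfold Pre_new_possible_solution; infer_instance
def pvWitness_new_possible_solution : List Bool := [true, false]

def Spec_new_possible_solution (oa : List Bool) (out : List Bool × Bool) : Prop := out = new_possible_solution_alt oa
instance (oa : List Bool) (out : List Bool × Bool) : Decidable (Spec_new_possible_solution oa out) := by unfold Spec_new_possible_solution; infer_instance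

-- ===== CLAIM (what is proved, stated in full; the proofs are below) =====
def Claim_equal_new_possible_solution : Prop := ∀ (oa : List Bool), Dom_new_possible_solution oa → Pre_new_possible_solution oa → Spec_new_possible_solution oa (new_possible_solution oa)

-- ===== LEMMAS AND PROOFS =====

-- How B's left-to-right pass behaves on a snoc: it is A's step rule.
lemma alt_concat (l : List Bool) (x : Bool) :
    new_possible_solution_alt (l ++ [x]) =
      if (new_possible_solution_alt l).2 = false
      then ((new_possible_solution_alt l).1 ++ [x], false)
      else ((new_possible_solution_alt l).1 ++ [!x], x) := by
  induction l with
  | nil => cases x <;> simp [new_possible_solution_alt]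
  | cons b l ih =>
      cases b <;> simp [new_possible_solution_alt, ih] <;> split_ifs <;> simp_all

lemma A_eq_alt : ∀ (l : List Bool) (x : Bool),
    new_possible_solution (l ++ [x]) = new_possible_solution_alt (l ++ [x]) := by
  intro l
  induction l using List.reverseRecOn with
  | nil =>
      intro x
      rw [new_possible_solution]
      cases x <;> simp [new_possible_solution_alt]
  | append_singleton l' y ih =>
      intro x
      rw [new_possible_solution, alt_concat]
      have hlen : (l' ++ [y] ++ [x]).length > 1 := by simp
      simp only [dif_pos hlen, List.dropLast_concat, List.getLastD_concat, ih y]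

-- ===== VERDICT (by name: the statement is the Claim_ definition above) =====
theorem new_possible_solution_spec : Claim_equal_new_possible_solution := by
  intro oa _ hpre
  rcases List.eq_nil_or_concat oa with h | ⟨l, x, h⟩
  · exact absurd h hpre
  · subst h
    show _ = _
    simpa [List.concat_eq_append] using A_eq_alt l x
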